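-- pv_equiv track=rewrite | github.com/bbialoskorski/AdventofCode2018 | dec9th_2.py | visit_tree
-- ===== SOURCE A (Python) =====
-- def visit_tree(index, tree):
--
--     num_children = tree[index]
--     metadata_count = tree[index + 1]
--
--     node_value = 0
--     children_values = list()
--
--     child_index = index + 2
--     length = 2 + metadata_count
--
--     for child in range(num_children):
--
--         child_value, child_length = visit_tree(child_index, tree)
--
--         children_values.append(child_value)
--
--         length += child_length
--         child_index += child_length
--
--     for i in range(metadata_count):
--
--         if num_children == 0:
--
--             node_value += tree[child_index + i]
--
--         elif tree[child_index + i] <= len(children_values) and tree[child_index + i] > 0: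
--
--             node_value += children_values[tree[child_index + i] - 1]
--
--     return node_value, length
-- ===== SOURCE B (Python) =====
-- def visit_tree(index, tree):
--     node, end = _parse_node(tree, index)
--     return _node_value(node), end - index
--
-- def _parse_node(tree, i):
--     num_children = tree[i]
--     metadata_count = tree[i + 1]
--     pos = i + 2
--     children = []
--     for _ in range(num_children):
--         child, pos = _parse_node(tree, pos)
--         children.append(child)
--     metadata = [tree[pos + k] for k in range(metadata_count)]
--     return (num_children, children, metadata), pos + metadata_count
--
-- def _node_value(node):
--     num_children, children, metadata = node
--     if num_children == 0:
--         return sum(metadata)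
--     values = [_node_value(child) for child in children]
--     return sum(values[v - 1] for v in metadata if 1 <= v <= len(values))
-- ===== Notes on version B (the rewrite author's own statement) =====
-- stated objective: alternative
-- what changed: A fuses parsing and evaluation in one recursion threading (value, length) accumulators; B is a two-phase decomposition that first materialises the node as an explicit tree (declared child count, children list, metadata list) by recursive descent and then computes the value with a separate recursive evaluator over that tree.
import Mathlib
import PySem

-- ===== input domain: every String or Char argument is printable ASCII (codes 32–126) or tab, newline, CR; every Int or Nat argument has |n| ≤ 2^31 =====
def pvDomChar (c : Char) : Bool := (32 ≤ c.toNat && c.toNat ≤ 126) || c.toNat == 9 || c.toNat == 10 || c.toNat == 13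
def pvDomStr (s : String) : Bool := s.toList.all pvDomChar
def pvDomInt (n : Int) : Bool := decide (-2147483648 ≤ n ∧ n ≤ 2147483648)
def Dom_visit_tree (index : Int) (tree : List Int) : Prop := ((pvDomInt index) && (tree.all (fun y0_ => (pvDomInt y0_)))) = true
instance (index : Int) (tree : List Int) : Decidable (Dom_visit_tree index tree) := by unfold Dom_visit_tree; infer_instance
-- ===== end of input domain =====

-- B re-decomposes A's fused recursion into parse-to-explicit-tree + separate evaluator; equal return values on Pre_ (well-formed headers), no speed claim.

-- ===== PORT A =====
-- A's recursion is ported with a fuel parameter (2 * tree.length + 2); inside Pre_ the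
-- nesting depth is below it (the positions along any descent chain are distinct header
-- positions, of which there are fewer than 2 * tree.length), so the fuel guard never
-- fires on admitted inputs.
mutual
def visitTreeFuel : Nat → List Int → Int → Int × Int
  | 0, _, _ => (0, 0)
  | f+1, tree, index =>
    let num_children := (PySem.List.pyGet? tree index).getD 0
    let metadata_count := (PySem.List.pyGet? tree (index + 1)).getD 0
    -- for child in range(num_children): recursive loop over the same state
    let st := aChildren f tree num_children.toNat [] (2 + metadata_count) (index + 2)
    let children_values := st.1
    let length := st.2.1
    let child_index := st.2.2
    -- for i in range(metadata_count):
    let node_value := (PySem.List.pyRange 0 metadata_count 1).foldl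
      (fun nv i =>
        let x := (PySem.List.pyGet? tree (child_index + i)).getD 0
        if num_children = 0 then nv + x
        else if x ≤ (children_values.length : Int) ∧ x > 0 then
          nv + (PySem.List.pyGet? children_values (x - 1)).getD 0
        else nv) 0
    (node_value, length)
termination_by f => (f, 0)

def aChildren : Nat → List Int → Nat → List Int → Int → Int → List Int × Int × Int
  | _, _, 0, cvs, length, ci => (cvs, length, ci)
  | f, tree, k+1, cvs, length, ci =>
    let r := visitTreeFuel f tree ci
    aChildren f tree k (cvs ++ [r.1]) (length + r.2) (ci + r.2)
termination_by f _ k => (f, k + 1)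
end

def visit_tree (index : Int) (tree : List Int) : Int × Int :=
  visitTreeFuel (2 * tree.length + 2) tree index

-- ===== PORT B =====
-- explicit tree: a node carries its child forest and its metadata list
mutual
inductive PTree where
  | node : Int → PForest → List Int → PTree
inductive PForest where
  | nil : PForest
  | cons : PTree → PForest → PForest
end

-- phase 1: recursive-descent parse of the node starting at i (fuel as in port A)
mutual
def parseNode : Nat → List Int → Int → PTree × Int
  | 0, _, i => (.node 0 .nil [], i)
  | f+1, tree, i =>
    let c := (PySem.List.pyGet? tree i).getD 0
    let m := (PySem.List.pyGet? tree (i + 1)).getD 0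
    let ks := parseKids f tree c.toNat (i + 2)
    let metadata := (PySem.List.pyRange 0 m 1).map
      (fun k => (PySem.List.pyGet? tree (ks.2 + k)).getD 0)
    (.node c ks.1 metadata, ks.2 + m)
termination_by f => (f, 0)

def parseKids : Nat → List Int → Nat → Int → PForest × Int
  | _, _, 0, pos => (.nil, pos)
  | f, tree, k+1, pos =>
    let t := parseNode f tree pos
    let rest := parseKids f tree k t.2
    (.cons t.1 rest.1, rest.2)
termination_by f _ k => (f, k + 1)
end

-- phase 2: evaluate the materialised tree
mutual
def evalTree : PTree → Int
  | .node num_children kids metadata =>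
    if num_children = 0 then metadata.foldl (· + ·) 0
    else
      let values := evalForest kids
      metadata.foldl
        (fun s v =>
          if 1 ≤ v ∧ v ≤ (values.length : Int) then
            s + (PySem.List.pyGet? values (v - 1)).getD 0
          else s) 0

def evalForest : PForest → List Int
  | .nil => []
  | .cons t rest => evalTree t :: evalForest rest
end

def visit_tree_alt (index : Int) (tree : List Int) : Int × Int :=
  let r := parseNode (2 * tree.length + 2) tree index
  (evalTree r.1, r.2 - index)

-- ===== PRECONDITION & SPEC =====
-- Pre_ holds exactly on the inputs where Python A returns normally: every header and
-- metadata read is an in-range (possibly negative, wraparound) index and the recursion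
-- terminates.  The check is the serialization grammar of a node, recursive by nature;
-- it validates structure only and computes no node values.  The bound 2 * tree.length + 2
-- exceeds the nesting depth of every terminating run (positions along a descent chain
-- are distinct header positions, of which there are fewer than 2 * tree.length).
def chkKidsF (step : Int → Option Int) : Nat → Int → Option Int
  | 0, pos => some pos
  | k+1, pos =>
    match step pos with
    | none => none
    | some e => chkKidsF step k e

def chkNode : Nat → List Int → Int → Option Int
  | 0, _, _ => none
  | f+1, tree, i =>
    if -(tree.length : Int) ≤ i ∧ i + 1 < (tree.length : Int) then
      let c := (PySem.List.pyGet? tree i).getD 0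
      let m := (PySem.List.pyGet? tree (i + 1)).getD 0
      match chkKidsF (fun p => chkNode f tree p) c.toNat (i + 2) with
      | none => none
      | some pos =>
        if 0 < m → (-(tree.length : Int) ≤ pos ∧ pos + m ≤ (tree.length : Int)) then
          some (pos + m)
        else none
    else none

def Pre_visit_tree (index : Int) (tree : List Int) : Prop :=
  (chkNode (2 * tree.length + 2) tree index).isSome = true

instance (index : Int) (tree : List Int) : Decidable (Pre_visit_tree index tree) := by
  unfold Pre_visit_tree; infer_instance

def pvWitness_visit_tree : Int × List Int :=
  (0, [2, 3, 0, 3, 10, 11, 12, 1, 1, 0, 1, 99, 2, 1, 1, 2])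

def Spec_visit_tree (index : Int) (tree : List Int) (out : Int × Int) : Prop := out = visit_tree_alt index tree
instance (index : Int) (tree : List Int) (out : Int × Int) : Decidable (Spec_visit_tree index tree out) := by unfold Spec_visit_tree; infer_instance

-- ===== CLAIM (what is proved, stated in full; the proofs are below) =====
def Claim_equal_visit_tree : Prop := ∀ (index : Int) (tree : List Int), Dom_visit_tree index tree → Pre_visit_tree index tree → Spec_visit_tree index tree (visit_tree index tree)

-- ===== LEMMAS AND PROOFS =====

-- children loop: chkKidsF success ties A's accumulator loop to B's parsed forest
theorem chk_kids_main (f : Nat) (tree : List Int)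
    (IH : ∀ (i e : Int), chkNode f tree i = some e →
      (parseNode f tree i).2 = e ∧
      visitTreeFuel f tree i = (evalTree (parseNode f tree i).1, e - i)) :
    ∀ (k : Nat) (pos e : Int), chkKidsF (fun p => chkNode f tree p) k pos = some e →
      (parseKids f tree k pos).2 = e ∧
      ∀ (cvs : List Int) (len : Int),
        aChildren f tree k cvs len pos =
          (cvs ++ evalForest (parseKids f tree k pos).1, len + (e - pos), e) := by
  intro k
  induction k with
  | zero =>
    intro pos e h
    simp only [chkKidsF, Option.some.injEq] at h
    subst h
    simp [parseKids, aChildren, evalForest]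
  | succ k ihk =>
    intro pos e h
    rw [chkKidsF] at h
    cases hn : chkNode f tree pos with
    | none => rw [hn] at h; simp at h
    | some e1 =>
      rw [hn] at h
      obtain ⟨hp, ha⟩ := IH pos e1 hn
      obtain ⟨hp2, ha2⟩ := ihk e1 e h
      refine ⟨?_, ?_⟩
      · rw [parseKids, hp, hp2]
      · intro cvs len
        rw [aChildren, ha]
        have hpos : pos + (e1 - pos) = e1 := by ring
        simp only [hpos]
        rw [ha2 (cvs ++ [evalTree (parseNode f tree pos).1]) (len + (e1 - pos))]
        rw [parseKids, hp]
        simp only [evalForest, List.append_assoc, List.singleton_append]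
        have : len + (e1 - pos) + (e - e1) = len + (e - pos) := by ring
        rw [this]

theorem chk_main : ∀ (f : Nat) (tree : List Int) (i e : Int),
    chkNode f tree i = some e →
    (parseNode f tree i).2 = e ∧
    visitTreeFuel f tree i = (evalTree (parseNode f tree i).1, e - i) := by
  intro f
  induction f with
  | zero => intro tree i e h; simp [chkNode] at h
  | succ f ih =>
    intro tree i e h
    rw [chkNode] at h
    split at h
    case isFalse => simp at h
    case isTrue hrng =>
      dsimp only [] at h
      set c := (PySem.List.pyGet? tree i).getD 0 with hcdef
      set m := (PySem.List.pyGet? tree (i + 1)).getD 0 with hmdef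
      cases hk : chkKidsF (fun p => chkNode f tree p) c.toNat (i + 2) with
      | none => rw [hk] at h; simp at h
      | some pos =>
        rw [hk] at h
        dsimp only [] at h
        by_cases hbnd : 0 < m → (-(tree.length : Int) ≤ pos ∧ pos + m ≤ (tree.length : Int))
        case neg => rw [if_neg hbnd] at h; simp at h
        case pos =>
          rw [if_pos hbnd] at h
          simp only [Option.some.injEq] at h
          obtain ⟨hp2, hach⟩ := chk_kids_main f tree (ih tree) c.toNat (i + 2) pos hk
          have he : e = pos + m := h.symm
          refine ⟨?_, ?_⟩
          · rw [parseNode, hp2, he]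
          · rw [visitTreeFuel, parseNode]
            simp only [← hcdef, ← hmdef]
            rw [hach [] (2 + m), hp2]
            dsimp only []
            rw [evalTree]
            by_cases hc0 : c = 0
            · -- header says no children: both sides sum the raw metadata values
              rw [if_pos hc0]
              rw [List.foldl_map]
              simp only [hc0, if_true]
              have he2 : e - i = 2 + m + (pos - (i + 2)) := by omega
              rw [he2]
            · -- header says children: both sides sum the guarded 1-based child lookups
              rw [if_neg hc0]
              dsimp only []
              rw [List.foldl_map]
              simp only [List.nil_append]
              rw [Prod.mk.injEq]
              constructor
              · congr 1
                funext s v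
                dsimp only []
                rw [if_neg hc0]
                split_ifs with h1 h2
                all_goals first | rfl | omega
              · omega

-- ===== VERDICT (by name: the statement is the Claim_ definition above) =====
theorem visit_tree_spec : Claim_equal_visit_tree := by
  intro index tree _hdom hpre
  unfold Spec_visit_tree visit_tree visit_tree_alt
  unfold Pre_visit_tree at hpre
  obtain ⟨e, he⟩ := Option.isSome_iff_exists.mp hpre
  obtain ⟨h1, h2⟩ := chk_main (2 * tree.length + 2) tree index e he
  simp [h2, h1]
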